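-- pv_equiv track=rewrite | github.com/Kasandra686/Algoritm_python_lesson_5 | 2.py | fun_sum
-- ===== SOURCE A (Python) =====
-- import collections
--
-- BASE = 16
--
-- HEX_LIST = ['0', '1', '2', '3', '4', '5', '6', '7', '8', '9', 'A', 'B', 'C', 'D', 'E', 'F']
--
-- BIN_NUMBERS = {'0': 0, '1': 1, '2': 2, '3': 3, '4': 4, '5': 5,
--                '6': 6, '7': 7, '8': 8, '9': 9, 'A': 10, 'B': 11,
--                'C': 12, 'D': 13, 'E': 14, 'F': 15}
--
-- def fun_sum(num1, num2):
--     num1 = num1.copy()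
--     num2 = num2.copy()
--     mem = 0
--     num1 = collections.deque(num1)
--     num2 = collections.deque(num2)
--     if len(num1) < len(num2):
--         num1, num2 = num2, num1
--     num2.extendleft('0' * (len(num1) - len(num2)))
--     res = collections.deque()
--     while len(num1) != 0:
--         first_num = BIN_NUMBERS[num1.pop()]
--         second_num = BIN_NUMBERS[num2.pop()]
--         result_num = first_num + second_num + mem
--         if result_num >= BASE:
--             mem = 1
--             result_num -= BASE
--         else:
--             mem = 0
--         res.appendleft(HEX_LIST[result_num])
--
--     if mem == 1:
--         res.appendleft('1')
--
--     return ''.join(res)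
-- ===== SOURCE B (Python) =====
-- HEX_LIST = ['0', '1', '2', '3', '4', '5', '6', '7', '8', '9', 'A', 'B', 'C', 'D', 'E', 'F']
--
-- BIN_NUMBERS = {'0': 0, '1': 1, '2': 2, '3': 3, '4': 4, '5': 5,
--                '6': 6, '7': 7, '8': 8, '9': 9, 'A': 10, 'B': 11,
--                'C': 12, 'D': 13, 'E': 14, 'F': 15}
--
-- def fun_sum(num1, num2):
--     a = 0
--     for d in num1:
--         a = 16 * a + BIN_NUMBERS[d]
--     b = 0
--     for d in num2:
--         b = 16 * b + BIN_NUMBERS[d]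
--     total = a + b
--     out = []
--     while total:
--         total, r = divmod(total, 16)
--         out.insert(0, HEX_LIST[r])
--     m = max(len(num1), len(num2))
--     return ''.join(['0'] * (m - len(out)) + out)
-- ===== Notes on version B (the rewrite author's own statement) =====
-- stated objective: simpler
-- what changed: B replaces A's deque swapping/left-padding and digit-by-digit carry-propagation loop by converting both digit lists to integers with Horner's rule, adding them, re-extracting the base-16 digits with divmod, and left-padding with '0' to the longer input's length.
import Mathlib
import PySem

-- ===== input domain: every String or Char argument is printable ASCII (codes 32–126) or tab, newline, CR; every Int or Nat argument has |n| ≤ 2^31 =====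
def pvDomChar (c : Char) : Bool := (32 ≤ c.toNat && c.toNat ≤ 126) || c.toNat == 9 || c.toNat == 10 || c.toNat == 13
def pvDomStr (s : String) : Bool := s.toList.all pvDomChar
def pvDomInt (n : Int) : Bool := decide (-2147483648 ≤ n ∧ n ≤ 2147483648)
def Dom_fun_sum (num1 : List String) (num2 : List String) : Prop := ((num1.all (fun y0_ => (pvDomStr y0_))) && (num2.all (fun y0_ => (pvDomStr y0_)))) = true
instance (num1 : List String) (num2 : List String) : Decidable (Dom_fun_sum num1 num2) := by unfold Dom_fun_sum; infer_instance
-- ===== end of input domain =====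

-- B replaces A's deque/carry-propagation loop by a direct numeric computation:
-- Horner-evaluate both digit lists to integers, add, re-extract the base-16 digits,
-- and left-pad with '0' to the longer input's length.  Objective: simpler.

-- ===== PORT A =====
def HEX_LIST : List String := ["0", "1", "2", "3", "4", "5", "6", "7", "8", "9", "A", "B", "C", "D", "E", "F"]

def BIN_NUMBERS : PySem.Dict String Int := PySem.Dict.ofList
  [("0", 0), ("1", 1), ("2", 2), ("3", 3), ("4", 4), ("5", 5),
   ("6", 6), ("7", 7), ("8", 8), ("9", 9), ("A", 10), ("B", 11),
   ("C", 12), ("D", 13), ("E", 14), ("F", 15)]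

-- A's while-loop: popping from the right = walking the reversed lists head-first;
-- res.appendleft = prepending to the accumulator; returns (res, mem).
-- (a failed lookup is a Python KeyError, excluded by Pre_; getD's default is never used there)
def fsLoop : List String → List String → Int → List String → (List String × Int)
  | [], _, mem, acc => (acc, mem)
  | _ :: _, [], mem, acc => (acc, mem)   -- unreachable: the lists have equal length after padding
  | x :: xs, y :: ys, mem, acc =>
    let first_num := PySem.Dict.getD BIN_NUMBERS x 0
    let second_num := PySem.Dict.getD BIN_NUMBERS y 0
    let r := first_num + second_num + mem
    let p := if r ≥ 16 then ((1 : Int), r - 16) else ((0 : Int), r)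
    fsLoop xs ys p.1 (((PySem.List.pyGet? HEX_LIST p.2).getD "") :: acc)

def fun_sum (num1 : List String) (num2 : List String) : String :=
  let sw := if num1.length < num2.length then (num2, num1) else (num1, num2)
  let n1 := sw.1
  let n2 := List.replicate (n1.length - sw.2.length) "0" ++ sw.2
  let res := fsLoop n1.reverse n2.reverse 0 []
  let res' := if res.2 = 1 then "1" :: res.1 else res.1
  String.join res'

-- ===== PORT B =====
-- 'for d in num1: a = 16*a + BIN_NUMBERS[d]'
def hornerVal (l : List String) : Int :=
  l.foldl (fun acc d => 16 * acc + PySem.Dict.getD BIN_NUMBERS d 0) 0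

-- 'while total: total, r = divmod(total, 16); out.insert(0, HEX_LIST[r])'
def hexDigits (n : Nat) (acc : List String) : List String :=
  if n = 0 then acc
  else hexDigits (n / 16) (((PySem.List.pyGet? HEX_LIST ((n : Int) % 16)).getD "") :: acc)
decreasing_by exact Nat.div_lt_self (Nat.pos_of_ne_zero (by assumption)) (by norm_num)

def fun_sum_alt (num1 : List String) (num2 : List String) : String :=
  let a := hornerVal num1
  let b := hornerVal num2
  let total := a + b
  let out := hexDigits total.toNat []
  let m := max num1.length num2.length
  String.join (List.replicate (m - out.length) "0" ++ out)

-- ===== PRECONDITION & SPEC =====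
-- Pre_ excludes exactly the inputs on which Python A raises KeyError:
-- some list element is not one of the sixteen upper-case hex digit strings.
def hexKeys : List String := ["0", "1", "2", "3", "4", "5", "6", "7", "8", "9", "A", "B", "C", "D", "E", "F"]

def Pre_fun_sum (num1 : List String) (num2 : List String) : Prop :=
  (∀ s ∈ num1, s ∈ hexKeys) ∧ (∀ s ∈ num2, s ∈ hexKeys)
instance (num1 : List String) (num2 : List String) : Decidable (Pre_fun_sum num1 num2) := by
  unfold Pre_fun_sum; infer_instance

def pvWitness_fun_sum : List String × List String := (["A", "7"], ["F"])

def Spec_fun_sum (num1 : List String) (num2 : List String) (out : String) : Prop := out = fun_sum_alt num1 num2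
instance (num1 : List String) (num2 : List String) (out : String) : Decidable (Spec_fun_sum num1 num2 out) := by unfold Spec_fun_sum; infer_instance

-- ===== CLAIM (what is proved, stated in full; the proofs are below) =====
def Claim_equal_fun_sum : Prop := ∀ (num1 : List String) (num2 : List String), Dom_fun_sum num1 num2 → Pre_fun_sum num1 num2 → Spec_fun_sum num1 num2 (fun_sum num1 num2)

-- ===== LEMMAS AND PROOFS =====

-- digit value of a hex-digit string
def dv (s : String) : Nat := (PySem.Dict.getD BIN_NUMBERS s 0).toNat

-- little-endian value of a digit list
def valLE : List Nat → Nat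
  | [] => 0
  | d :: r => d + 16 * valLE r

-- big-endian numeric value of a hex-digit string list
def V (l : List String) : Nat := valLE ((l.map dv).reverse)

-- little-endian base-16 digits of a natural number ([] for 0)
def digsLE (n : Nat) : List Nat :=
  if n = 0 then [] else n % 16 :: digsLE (n / 16)
decreasing_by exact Nat.div_lt_self (Nat.pos_of_ne_zero (by assumption)) (by norm_num)

def padLE (n : Nat) (l : List Nat) : List Nat := l ++ List.replicate (n - l.length) 0

def hexStr (r : Nat) : String := (PySem.List.pyGet? HEX_LIST (r : Int)).getD ""

-- spec-level mirror of fsLoop's per-position digits and final carry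
def runDigits : List Nat → List Nat → Nat → List Nat
  | [], _, _ => []
  | _ :: _, [], _ => []
  | x :: xs, y :: ys, c => (x + y + c) % 16 :: runDigits xs ys ((x + y + c) / 16)

def runCarry : List Nat → List Nat → Nat → Nat
  | [], _, c => c
  | _ :: _, [], c => c
  | x :: xs, y :: ys, c => runCarry xs ys ((x + y + c) / 16)

lemma dv_spec {s : String} (h : s ∈ hexKeys) :
    PySem.Dict.getD BIN_NUMBERS s 0 = ((dv s : Nat) : Int) ∧ dv s < 16 := by
  simp only [hexKeys, List.mem_cons, List.not_mem_nil, or_false] at h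
  rcases h with rfl|rfl|rfl|rfl|rfl|rfl|rfl|rfl|rfl|rfl|rfl|rfl|rfl|rfl|rfl|rfl <;>
    exact ⟨by decide, by decide⟩

lemma valLE_append (a b : List Nat) : valLE (a ++ b) = valLE a + 16 ^ a.length * valLE b := by
  induction a with
  | nil => simp [valLE]
  | cons d r ih => simp [valLE, ih, pow_succ]; ring

lemma valLE_pad_zero (a : List Nat) (k : Nat) : valLE (a ++ List.replicate k 0) = valLE a := by
  have : valLE (List.replicate k 0) = 0 := by
    induction k with
    | zero => simp [valLE]
    | succ n ih => simp [List.replicate_succ, valLE, ih]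
  simp [valLE_append, this]

lemma padLE_cons (n x : Nat) (l : List Nat) : padLE (n + 1) (x :: l) = x :: padLE n l := by
  simp [padLE]

-- core: one carry-propagation pass = the padded base-16 digits of the numeric sum
lemma carry_core : ∀ (l1 l2 : List Nat), l1.length = l2.length →
    (∀ d ∈ l1, d < 16) → (∀ d ∈ l2, d < 16) → ∀ c ≤ 1,
    (runDigits l1 l2 c) ++ (if runCarry l1 l2 c = 1 then [1] else [])
      = padLE l1.length (digsLE (valLE l1 + valLE l2 + c)) := by
  intro l1
  induction l1 with
  | nil =>
    intro l2 hlen _ _ c hc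
    have : l2 = [] := by cases l2 <;> simp_all
    subst this
    interval_cases c <;> simp [runDigits, runCarry, valLE, padLE, digsLE]
  | cons x xs ih =>
    intro l2 hlen h1 h2 c hc
    cases l2 with
    | nil => simp at hlen
    | cons y ys =>
      have hx : x < 16 := h1 x (by simp)
      have hy : y < 16 := h2 y (by simp)
      have hlen' : xs.length = ys.length := by simpa using hlen
      have hih := ih ys hlen' (fun d hd => h1 d (by simp [hd])) (fun d hd => h2 d (by simp [hd]))
        ((x + y + c) / 16) (by omega)
      rw [show runDigits (x :: xs) (y :: ys) c
            = (x + y + c) % 16 :: runDigits xs ys ((x + y + c) / 16) from rfl,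
          show runCarry (x :: xs) (y :: ys) c = runCarry xs ys ((x + y + c) / 16) from rfl,
          List.cons_append, hih]
      simp only [List.length_cons]
      have hv : valLE (x :: xs) + valLE (y :: ys) + c
          = (x + y + c) % 16 + 16 * (valLE xs + valLE ys + (x + y + c) / 16) := by
        simp only [valLE]; omega
      rw [hv]
      set T := valLE xs + valLE ys + (x + y + c) / 16 with hT
      by_cases h0 : (x + y + c) % 16 + 16 * T = 0
      · have hm : (x + y + c) % 16 = 0 := by omega
        have hT0 : T = 0 := by omega
        rw [h0, hT0]
        simp [hm, digsLE, padLE, List.replicate_succ]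
      · conv_rhs => rw [digsLE]
        rw [if_neg h0]
        have e1 : ((x + y + c) % 16 + 16 * T) % 16 = (x + y + c) % 16 := by omega
        have e2 : ((x + y + c) % 16 + 16 * T) / 16 = T := by omega
        rw [e1, e2, padLE_cons]

lemma fsLoop_eq : ∀ (l1 : List String) (l2 : List String) (c : Nat) (acc : List String),
    l1.length = l2.length → (∀ s ∈ l1, s ∈ hexKeys) → (∀ s ∈ l2, s ∈ hexKeys) → c ≤ 1 →
    fsLoop l1 l2 (c : Int) acc =
      (((runDigits (l1.map dv) (l2.map dv) c).map hexStr).reverse ++ acc,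
       ((runCarry (l1.map dv) (l2.map dv) c : Nat) : Int)) := by
  intro l1
  induction l1 with
  | nil =>
    intro l2 c acc hlen _ _ _
    have : l2 = [] := by cases l2 <;> simp_all
    subst this
    simp [fsLoop, runDigits, runCarry]
  | cons x xs ih =>
    intro l2 c acc hlen h1 h2 hc
    cases l2 with
    | nil => simp at hlen
    | cons y ys =>
      have hlen' : xs.length = ys.length := by simpa using hlen
      obtain ⟨hgx, hdx⟩ := dv_spec (h1 x (by simp))
      obtain ⟨hgy, hdy⟩ := dv_spec (h2 y (by simp))
      have h1' : ∀ s ∈ xs, s ∈ hexKeys := fun s hs => h1 s (by simp [hs])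
      have h2' : ∀ s ∈ ys, s ∈ hexKeys := fun s hs => h2 s (by simp [hs])
      simp only [fsLoop]
      rw [show (x :: xs).map dv = dv x :: xs.map dv from rfl,
          show (y :: ys).map dv = dv y :: ys.map dv from rfl,
          show runDigits (dv x :: xs.map dv) (dv y :: ys.map dv) c
            = (dv x + dv y + c) % 16 :: runDigits (xs.map dv) (ys.map dv) ((dv x + dv y + c) / 16) from rfl,
          show runCarry (dv x :: xs.map dv) (dv y :: ys.map dv) c
            = runCarry (xs.map dv) (ys.map dv) ((dv x + dv y + c) / 16) from rfl]
      by_cases h16 : PySem.Dict.getD BIN_NUMBERS x 0 + PySem.Dict.getD BIN_NUMBERS y 0 + (c : Int) ≥ 16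
      · rw [if_pos h16]
        have hs16 : 16 ≤ dv x + dv y + c := by
          rw [hgx, hgy] at h16; exact_mod_cast h16
        have ediv : (dv x + dv y + c) / 16 = 1 := by omega
        have emod : PySem.Dict.getD BIN_NUMBERS x 0 + PySem.Dict.getD BIN_NUMBERS y 0 + (c : Int) - 16
            = (((dv x + dv y + c) % 16 : Nat) : Int) := by
          rw [hgx, hgy]; push_cast; omega
        have hrec := ih ys ((dv x + dv y + c) / 16)
          (((PySem.List.pyGet? HEX_LIST (((dv x + dv y + c) % 16 : Nat) : Int)).getD "") :: acc)
          hlen' h1' h2' (by omega)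
        rw [ediv, Nat.cast_one] at hrec
        dsimp only
        rw [emod, ediv, hrec]
        simp [hexStr, List.reverse_cons, List.append_assoc]
      · rw [if_neg h16]
        have hs16 : dv x + dv y + c < 16 := by
          rw [hgx, hgy] at h16
          have := lt_of_not_ge h16
          exact_mod_cast this
        have ediv : (dv x + dv y + c) / 16 = 0 := by omega
        have emod : PySem.Dict.getD BIN_NUMBERS x 0 + PySem.Dict.getD BIN_NUMBERS y 0 + (c : Int)
            = (((dv x + dv y + c) % 16 : Nat) : Int) := by
          rw [hgx, hgy]; push_cast; omega
        have hrec := ih ys ((dv x + dv y + c) / 16)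
          (((PySem.List.pyGet? HEX_LIST (((dv x + dv y + c) % 16 : Nat) : Int)).getD "") :: acc)
          hlen' h1' h2' (by omega)
        rw [ediv, Nat.cast_zero] at hrec
        dsimp only
        rw [emod, ediv, hrec]
        simp [hexStr, List.reverse_cons, List.append_assoc]

lemma hexDigits_eq (n : Nat) : ∀ acc, hexDigits n acc = ((digsLE n).map hexStr).reverse ++ acc := by
  induction n using Nat.strong_induction_on with
  | _ n ih =>
    intro acc
    rw [hexDigits]
    by_cases h : n = 0
    · simp [h, digsLE]
    · rw [if_neg h, ih (n / 16) (Nat.div_lt_self (Nat.pos_of_ne_zero h) (by norm_num))]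
      conv_rhs => rw [digsLE]
      rw [if_neg h]
      have : ((n : Int) % 16) = ((n % 16 : Nat) : Int) := by omega
      rw [this]
      simp [hexStr, List.reverse_cons, List.append_assoc]

lemma horner_aux : ∀ (l : List String) (init : Nat), (∀ s ∈ l, s ∈ hexKeys) →
    List.foldl (fun acc d => 16 * acc + PySem.Dict.getD BIN_NUMBERS d 0) ((init : Nat) : Int) l
      = ((valLE ((l.map dv).reverse) + init * 16 ^ l.length : Nat) : Int) := by
  intro l
  induction l with
  | nil => intro init _; simp [valLE]
  | cons x xs ih =>
    intro init h
    obtain ⟨hgx, hdx⟩ := dv_spec (h x (by simp))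
    have h' : ∀ s ∈ xs, s ∈ hexKeys := fun s hs => h s (by simp [hs])
    rw [List.foldl_cons, hgx,
        show 16 * ((init : Nat) : Int) + ((dv x : Nat) : Int) = ((16 * init + dv x : Nat) : Int) from by push_cast; ring,
        ih (16 * init + dv x) h']
    congr 1
    rw [show (x :: xs).map dv = dv x :: xs.map dv from rfl, List.reverse_cons, valLE_append]
    simp [valLE, List.length_cons, pow_succ]
    ring

lemma horner_eq : ∀ (l : List String), (∀ s ∈ l, s ∈ hexKeys) →
    hornerVal l = ((V l : Nat) : Int) := by
  intro l h
  have := horner_aux l 0 h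
  simpa [hornerVal, V] using this

lemma B_eval (num1 num2 : List String) (h1 : ∀ s ∈ num1, s ∈ hexKeys) (h2 : ∀ s ∈ num2, s ∈ hexKeys) :
    fun_sum_alt num1 num2 =
      String.join (((padLE (max num1.length num2.length) (digsLE (V num1 + V num2))).map hexStr).reverse) := by
  simp only [fun_sum_alt]
  rw [horner_eq num1 h1, horner_eq num2 h2,
      show ((V num1 : Nat) : Int) + ((V num2 : Nat) : Int) = ((V num1 + V num2 : Nat) : Int) from by push_cast; ring,
      Int.toNat_natCast, hexDigits_eq]
  congr 1
  rw [padLE, List.map_append, List.map_replicate, List.reverse_append, List.reverse_replicate]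
  simp [hexStr]
  right
  decide

lemma A_eval (n1 n2 : List String) (hle : n2.length ≤ n1.length)
    (h1 : ∀ s ∈ n1, s ∈ hexKeys) (h2 : ∀ s ∈ n2, s ∈ hexKeys) :
    fun_sum n1 n2 =
      String.join (((padLE n1.length (digsLE (V n1 + V n2))).map hexStr).reverse) := by
  unfold fun_sum
  rw [if_neg (Nat.not_lt.mpr hle)]
  dsimp only
  have hlen2 : (List.replicate (n1.length - n2.length) "0" ++ n2).length = n1.length := by
    simp; omega
  have h2' : ∀ s ∈ (List.replicate (n1.length - n2.length) "0" ++ n2).reverse, s ∈ hexKeys := by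
    intro s hs
    rw [List.mem_reverse, List.mem_append] at hs
    rcases hs with hs | hs
    · rw [List.eq_of_mem_replicate hs]; decide
    · exact h2 s hs
  have h1' : ∀ s ∈ n1.reverse, s ∈ hexKeys := fun s hs => h1 s (List.mem_reverse.mp hs)
  rw [show (0 : Int) = ((0 : Nat) : Int) from rfl,
      fsLoop_eq n1.reverse (List.replicate (n1.length - n2.length) "0" ++ n2).reverse 0 []
        (by simp; omega) h1' h2' (by omega)]
  dsimp only
  set ds1 := (n1.reverse).map dv with hds1
  set ds2 := ((List.replicate (n1.length - n2.length) "0" ++ n2).reverse).map dv with hds2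
  have hd1 : ∀ d ∈ ds1, d < 16 := by
    intro d hd
    rw [hds1, List.mem_map] at hd
    obtain ⟨s, hs, rfl⟩ := hd
    exact (dv_spec (h1' s hs)).2
  have hd2 : ∀ d ∈ ds2, d < 16 := by
    intro d hd
    rw [hds2, List.mem_map] at hd
    obtain ⟨s, hs, rfl⟩ := hd
    exact (dv_spec (h2' s hs)).2
  have hlend : ds1.length = ds2.length := by
    rw [hds1, hds2]; simp; omega
  have hcc := carry_core ds1 ds2 hlend hd1 hd2 0 (by omega)
  have hv1 : valLE ds1 = V n1 := by rw [hds1, V, List.map_reverse]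
  have hv2 : valLE ds2 = V n2 := by
    rw [hds2, List.map_reverse, List.map_append, List.map_replicate,
        show dv "0" = 0 from by decide, List.reverse_append, List.reverse_replicate, valLE_pad_zero, V]
  have hl1 : ds1.length = n1.length := by rw [hds1]; simp
  rw [hv1, hv2, hl1, Nat.add_zero] at hcc
  have hsplit : (if ((runCarry ds1 ds2 0 : Nat) : Int) = 1
        then "1" :: (((runDigits ds1 ds2 0).map hexStr).reverse ++ [])
        else ((runDigits ds1 ds2 0).map hexStr).reverse ++ [])
      = ((padLE n1.length (digsLE (V n1 + V n2))).map hexStr).reverse := by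
    rw [← hcc, List.map_append, List.reverse_append]
    by_cases hcar : runCarry ds1 ds2 0 = 1
    · rw [if_pos (by exact_mod_cast hcar), if_pos hcar]
      simp [hexStr]
      decide
    · rw [if_neg (by exact_mod_cast hcar), if_neg hcar]
      simp
  rw [hsplit]

lemma fun_sum_swap (num1 num2 : List String) (h : num1.length < num2.length) :
    fun_sum num1 num2 = fun_sum num2 num1 := by
  simp [fun_sum, h, Nat.lt_asymm h]

-- ===== VERDICT (by name: the statement is the Claim_ definition above) =====
theorem fun_sum_spec : Claim_equal_fun_sum := by
  intro num1 num2 _ hpre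
  unfold Spec_fun_sum
  obtain ⟨h1, h2⟩ := hpre
  by_cases hc : num1.length < num2.length
  · rw [fun_sum_swap num1 num2 hc, A_eval num2 num1 (Nat.le_of_lt hc) h2 h1,
      B_eval num1 num2 h1 h2, Nat.add_comm (V num2) (V num1),
      Nat.max_eq_right (Nat.le_of_lt hc)]
  · rw [A_eval num1 num2 (Nat.le_of_not_lt hc) h1 h2, B_eval num1 num2 h1 h2,
      Nat.max_eq_left (Nat.le_of_not_lt hc)]
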